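-- pv_equiv track=rewrite | github.com/thierry123454/tool-selection-bias | 4_gather_and_visualize_data/extract_selected_api_small_k.py | build_endpoint_id_map
-- ===== SOURCE A (Python) =====
-- def build_endpoint_id_map(instruction_data):
--     """
--     Build a stable mapping (tool_name, api_name) -> api_id for a given run
--     by scanning all 'relevant APIs' entries in the instruction JSON.
--     """
--     endpoint_to_id = {}
--     next_id = 0
--
--     for item in instruction_data:
--         rel_apis = item.get("relevant APIs", [])
--         for tool_name, api_name in rel_apis:
--             key = (tool_name, api_name)
--             if key not in endpoint_to_id:
--                 endpoint_to_id[key] = next_id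
--                 next_id += 1
--
--     return endpoint_to_id
-- ===== SOURCE B (Python) =====
-- def build_endpoint_id_map(instruction_data):
--     keys = [(tool_name, api_name)
--             for item in instruction_data
--             for tool_name, api_name in item.get("relevant APIs", [])]
--     return {keys[i]: len(set(keys[:i]))
--             for i in range(len(keys))
--             if keys[i] not in keys[:i]}
-- ===== Notes on version B (the rewrite author's own statement) =====
-- stated objective: alternative
-- what changed: B keeps no seen-set and no running counter: it flattens all (tool, api) pairs and then, scanning positions, keeps each first occurrence (key absent from the prefix) and computes its id non-incrementally as the number of distinct keys in the prefix before it, trading A's incremental dict+counter single pass for a quadratic prefix-recomputation comprehension.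
import Mathlib
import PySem

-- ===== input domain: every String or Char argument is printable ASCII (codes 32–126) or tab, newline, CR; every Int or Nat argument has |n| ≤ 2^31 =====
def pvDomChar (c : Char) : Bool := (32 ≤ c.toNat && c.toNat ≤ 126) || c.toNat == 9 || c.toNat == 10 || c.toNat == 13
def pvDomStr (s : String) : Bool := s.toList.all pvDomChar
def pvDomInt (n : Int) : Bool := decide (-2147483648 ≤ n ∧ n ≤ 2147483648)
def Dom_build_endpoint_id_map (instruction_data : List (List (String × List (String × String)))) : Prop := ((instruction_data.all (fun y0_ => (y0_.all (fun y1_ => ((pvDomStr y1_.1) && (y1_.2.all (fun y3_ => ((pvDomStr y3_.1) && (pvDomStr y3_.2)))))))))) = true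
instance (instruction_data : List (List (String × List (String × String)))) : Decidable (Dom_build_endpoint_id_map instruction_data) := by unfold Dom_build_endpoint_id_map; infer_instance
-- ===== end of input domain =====

-- B drops A's seen-dict and running counter: it flattens the pairs, keeps each
-- position whose key is absent from the prefix before it, and computes that key's
-- id as the number of distinct keys in that prefix (alternative; not faster).

-- ===== PORT A =====
-- A's dict keyed by the pair (tool_name, api_name) is the association list of
-- flattened entries (tool_name, api_name, id); 'key not in endpoint_to_id' is the
-- absence of an entry with that key; state = (endpoint_to_id, next_id).
def build_endpoint_id_map (instruction_data : List (List (String × List (String × String)))) : List (String × String × Int) :=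
  (instruction_data.foldl
    (fun st item =>
      (PySem.Dict.getD ⟨item⟩ "relevant APIs" ([] : List (String × String))).foldl
        (fun st p =>
          if st.1.any (fun e => e.1 == p.1 && e.2.1 == p.2) then st
          else (st.1 ++ [(p.1, p.2, st.2)], st.2 + 1))
        st)
    (([] : List (String × String × Int)), (0 : Int))).1

-- ===== PORT B =====
-- 'for i in range(len(keys))' is the fold over List.range; keys[i] is always in
-- range there, so 'keys.getD i ("","")' is exact; len(set(keys[:i])) is the
-- length of PySem.Set.ofList of the prefix.
def build_endpoint_id_map_alt (instruction_data : List (List (String × List (String × String)))) : List (String × String × Int) :=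
  let keys := instruction_data.flatMap
    (fun item => PySem.Dict.getD ⟨item⟩ "relevant APIs" ([] : List (String × String)))
  (List.range keys.length).foldl
    (fun acc i =>
      let k := keys.getD i ("", "")
      if (keys.take i).contains k then acc
      else acc ++ [(k.1, k.2, ((PySem.Set.ofList (keys.take i)).length : Int))])
    []

-- ===== PRECONDITION & SPEC =====
def Spec_build_endpoint_id_map (instruction_data : List (List (String × List (String × String)))) (out : List (String × String × Int)) : Prop := out = build_endpoint_id_map_alt instruction_data
instance (instruction_data : List (List (String × List (String × String)))) (out : List (String × String × Int)) : Decidable (Spec_build_endpoint_id_map instruction_data out) := by unfold Spec_build_endpoint_id_map; infer_instance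

-- ===== CLAIM (what is proved, stated in full; the proofs are below) =====
def Claim_equal_build_endpoint_id_map : Prop := ∀ (instruction_data : List (List (String × List (String × String)))), Dom_build_endpoint_id_map instruction_data → Spec_build_endpoint_id_map instruction_data (build_endpoint_id_map instruction_data)

-- ===== LEMMAS AND PROOFS =====

-- A's inner-loop step, abstracted over the key being processed.
def pvStep (st : List (String × String × Int) × Int) (p : String × String) : List (String × String × Int) × Int :=
  if st.1.any (fun e => e.1 == p.1 && e.2.1 == p.2) then st
  else (st.1 ++ [(p.1, p.2, st.2)], st.2 + 1)

-- B's loop step, abstracted over the flattened key list.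
def pvStepB (keys : List (String × String)) (acc : List (String × String × Int)) (i : Nat) : List (String × String × Int) :=
  let k := keys.getD i ("", "")
  if (keys.take i).contains k then acc
  else acc ++ [(k.1, k.2, ((PySem.Set.ofList (keys.take i)).length : Int))]

-- Numbering of a duplicate-free key list in order.
def pvNum (u : List (String × String)) : List (String × String × Int) :=
  (PySem.List.enumerate u).map (fun p => (p.2.1, p.2.2, p.1))

theorem pvEnumerate_append_singleton {α : Type} (xs : List α) (x : α) (s : Int) :
    PySem.List.enumerate (xs ++ [x]) s = PySem.List.enumerate xs s ++ [(s + xs.length, x)] := by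
  induction xs generalizing s with
  | nil => simp [PySem.List.enumerate_nil, PySem.List.enumerate_cons]
  | cons y ys ih =>
      simp [PySem.List.enumerate_cons, ih]
      ring_nf

theorem pvNum_append (u : List (String × String)) (k : String × String) :
    pvNum (u ++ [k]) = pvNum u ++ [(k.1, k.2, (u.length : Int))] := by
  simp [pvNum, pvEnumerate_append_singleton]

theorem pvAny_pair (u : List (String × String)) (p : String × String) :
    (u.any fun x => x.1 == p.1 && x.2 == p.2) = u.contains p := by
  induction u with
  | nil => simp
  | cons x xs ih =>
      rcases x with ⟨x1, x2⟩; rcases p with ⟨p1, p2⟩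
      simp only [List.any_cons, List.contains_cons, ih]
      rw [show (((p1, p2) : String × String) == (x1, x2)) = (p1 == x1 && p2 == x2) from rfl]
      rw [Bool.beq_comm (a := x1) (b := p1), Bool.beq_comm (a := x2) (b := p2)]

theorem pvAny_enum {α : Type} (u : List α) (s : Int) (f : α → Bool) :
    ((PySem.List.enumerate u s).any fun x => f x.2) = u.any f := by
  induction u generalizing s with
  | nil => simp [PySem.List.enumerate_nil]
  | cons x xs ih => simp [PySem.List.enumerate_cons, ih]

theorem pvNum_any (u : List (String × String)) (p : String × String) :
    (pvNum u).any (fun e => e.1 == p.1 && e.2.1 == p.2) = u.contains p := by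
  have h1 : (pvNum u).any (fun e => e.1 == p.1 && e.2.1 == p.2)
      = u.any (fun x => x.1 == p.1 && x.2 == p.2) := by
    simp only [pvNum, List.any_map]
    exact pvAny_enum u 0 (fun x => x.1 == p.1 && x.2 == p.2)
  rw [h1, pvAny_pair]

theorem pvStep_num (u : List (String × String)) (p : String × String) :
    pvStep (pvNum u, (u.length : Int)) p
      = (pvNum (PySem.Set.add u p), ((PySem.Set.add u p).length : Int)) := by
  by_cases hm : p ∈ u <;>
    simp [pvStep, PySem.Set.add, PySem.Set.contains, pvNum_any, hm, pvNum_append]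

theorem pvFoldl_step (ks : List (String × String)) (u : List (String × String)) :
    ks.foldl pvStep (pvNum u, (u.length : Int))
      = (pvNum (ks.foldl PySem.Set.add u), ((ks.foldl PySem.Set.add u).length : Int)) := by
  induction ks generalizing u with
  | nil => simp
  | cons k ks ih => simp only [List.foldl_cons, pvStep_num, ih]

theorem pvFoldl_flatMap {α β γ : Type} (l : List α) (f : α → List β)
    (g : γ → β → γ) (init : γ) :
    l.foldl (fun st a => (f a).foldl g st) init = (l.flatMap f).foldl g init := by
  induction l generalizing init with
  | nil => simp
  | cons x xs ih => simp [List.flatMap_cons, List.foldl_append, ih]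

theorem pvFoldl_congr {α β : Type} {l : List α} {f g : β → α → β} {init : β}
    (h : ∀ b a, a ∈ l → f b a = g b a) : l.foldl f init = l.foldl g init := by
  induction l generalizing init with
  | nil => rfl
  | cons x xs ih =>
      simp only [List.foldl_cons, h init x (List.mem_cons_self)]
      exact ih (fun b a ha => h b a (List.mem_cons_of_mem _ ha)) 

-- B's range fold computes the numbering of the deduplicated key list.
theorem pvB_eq_num (keys : List (String × String)) :
    (List.range keys.length).foldl (pvStepB keys) [] = pvNum (PySem.Set.ofList keys) := by
  induction keys using List.reverseRecOn with
  | nil => simp [pvNum, PySem.List.enumerate_nil]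
  | append_singleton ks k ih =>
      have hlen : (ks ++ [k]).length = ks.length + 1 := by simp
      rw [hlen, List.range_succ, List.foldl_append]
      have hcongr : (List.range ks.length).foldl (pvStepB (ks ++ [k])) []
          = (List.range ks.length).foldl (pvStepB ks) [] := by
        apply pvFoldl_congr
        intro acc i hi
        have hi' : i < ks.length := List.mem_range.mp hi
        have ht : (ks ++ [k]).take i = ks.take i := by
          rw [List.take_append_of_le_length (le_of_lt hi')]
        have hg : (ks ++ [k])[i]? = ks[i]? := List.getElem?_append_left hi'
        simp [pvStepB, List.getD, ht, hg]
      rw [hcongr, ih]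
      have hofl : PySem.Set.ofList (ks ++ [k]) = PySem.Set.add (PySem.Set.ofList ks) k := by
        simp [PySem.Set.ofList_eq_foldl, List.foldl_append]
      have htake : (ks ++ [k]).take ks.length = ks := by
        rw [List.take_append_of_le_length (le_refl _)]; simp
      have hget : (ks ++ [k]).getD ks.length ("", "") = k := by
        simp [List.getD]
      by_cases hm : k ∈ ks
      · have hc : ks.contains k = true := by simpa using hm
        simp [pvStepB, htake, hofl, PySem.Set.add, PySem.Set.contains, hm]
      · have hc : ks.contains k = false := by simpa using hm
        have hmo : k ∉ PySem.Set.ofList ks := by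
          simpa [PySem.Set.mem_ofList] using hm
        have hadd : PySem.Set.add (PySem.Set.ofList ks) k = PySem.Set.ofList ks ++ [k] := by
          simp [PySem.Set.add, PySem.Set.contains, hmo]
        simp [pvStepB, htake, hofl, hadd, pvNum_append]
        exact hm

-- ===== VERDICT (by name: the statement is the Claim_ definition above) =====
theorem build_endpoint_id_map_spec : Claim_equal_build_endpoint_id_map := by
  intro instruction_data _
  show build_endpoint_id_map instruction_data = build_endpoint_id_map_alt instruction_data
  show (instruction_data.foldl
      (fun st item =>
        (PySem.Dict.getD ⟨item⟩ "relevant APIs" ([] : List (String × String))).foldl pvStep st)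
      (pvNum [], ((([] : List (String × String)).length : Nat) : Int))).1
    = build_endpoint_id_map_alt instruction_data
  rw [pvFoldl_flatMap, pvFoldl_step]
  have hb : build_endpoint_id_map_alt instruction_data
      = pvNum (PySem.Set.ofList (instruction_data.flatMap
          (fun item => PySem.Dict.getD ⟨item⟩ "relevant APIs" ([] : List (String × String))))) := by
    exact pvB_eq_num _
  rw [hb, PySem.Set.ofList_eq_foldl]
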